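-- pv_equiv track=rewrite | github.com/Vitor-742/desafiosPy | desafio2.py | calculaFibonacci
-- ===== SOURCE A (Python) =====
-- def calculaFibonacci(numberx):
--     y = 0
--     z = 1
--     while numberx >= y:
--         if y == numberx:
--             return 'pertence a sequencia'
--         aux = z + y
--         y = z
--         z = aux
--     return 'nao pertence a sequencia'
-- ===== SOURCE B (Python) =====
-- def _isqrt(v):
--     # floor square root by binary search (v >= 0)
--     if v < 2:
--         return v
--     lo, hi = 1, v
--     while hi - lo > 1:
--         mid = (lo + hi) // 2
--         if mid * mid <= v:
--             lo = mid
--         else: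
--             hi = mid
--     return lo
--
--
-- def _is_square(v):
--     if v < 0:
--         return False
--     s = _isqrt(v)
--     return s * s == v
--
--
-- def calculaFibonacci(numberx):
--     if numberx < 0:
--         return 'nao pertence a sequencia'
--     if _is_square(5 * numberx * numberx + 4) or _is_square(5 * numberx * numberx - 4):
--         return 'pertence a sequencia'
--     return 'nao pertence a sequencia'
-- ===== Notes on version B (the rewrite author's own statement) =====
-- stated objective: alternative
-- what changed: Replaces the Fibonacci-generating while loop with the closed-form perfect-square test (n >= 0 is Fibonacci iff 5n^2+4 or 5n^2-4 is a perfect square), using a hand-written binary-search integer square root.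
import Mathlib
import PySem

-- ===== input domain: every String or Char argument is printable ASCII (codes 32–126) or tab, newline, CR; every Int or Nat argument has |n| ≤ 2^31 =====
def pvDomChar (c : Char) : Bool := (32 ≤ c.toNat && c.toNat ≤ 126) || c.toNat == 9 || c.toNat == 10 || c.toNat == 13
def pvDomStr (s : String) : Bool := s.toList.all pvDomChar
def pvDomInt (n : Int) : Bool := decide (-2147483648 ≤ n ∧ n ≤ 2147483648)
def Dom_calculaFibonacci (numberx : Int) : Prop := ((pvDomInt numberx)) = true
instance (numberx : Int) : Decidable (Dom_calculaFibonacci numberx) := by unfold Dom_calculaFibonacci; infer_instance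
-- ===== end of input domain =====

-- B replaces A's Fibonacci-generating loop by the closed-form perfect-square test
-- (n ≥ 0 is a Fibonacci number iff 5n²+4 or 5n²-4 is a perfect square), with a
-- hand-written binary-search integer square root; equivalence is proved for all Int inputs.

-- ===== PORT A =====
-- A's while loop: y, z walk along consecutive Fibonacci pairs.  The proof
-- arguments 0 ≤ y, 1 ≤ z record the loop invariant needed for termination only.
def fibLoopA (numberx y z : Int) (hy : 0 ≤ y) (hz : 1 ≤ z) : String :=
  if hyn : y ≤ numberx then
    if y = numberx then "pertence a sequencia"
    else fibLoopA numberx z (z + y) (by omega) (by omega)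
  else "nao pertence a sequencia"
termination_by ((numberx + 1 - y).toNat + (numberx + 1 - z).toNat)
decreasing_by omega

def calculaFibonacci (numberx : Int) : String :=
  fibLoopA numberx 0 1 (by omega) (by omega)

-- ===== PORT B =====
-- binary-search floor square root (Source B's _isqrt while loop)
def isqrtLoop (v lo hi : Int) : Int :=
  if _h : hi - lo > 1 then
    let mid := PySem.Int.floordiv (lo + hi) 2
    if mid * mid ≤ v then isqrtLoop v mid hi else isqrtLoop v lo mid
  else lo
termination_by (hi - lo).toNat
decreasing_by
  all_goals
    rw [PySem.Int.floordiv_eq_ediv_of_pos (by omega)]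
    omega

def pyIsqrt (v : Int) : Int :=
  if v < 2 then v else isqrtLoop v 1 v

def pyIsSquare (v : Int) : Bool :=
  if v < 0 then false
  else
    let s := pyIsqrt v
    s * s == v

def calculaFibonacci_alt (numberx : Int) : String :=
  if numberx < 0 then "nao pertence a sequencia"
  else if pyIsSquare (5 * numberx * numberx + 4) || pyIsSquare (5 * numberx * numberx - 4) then
    "pertence a sequencia"
  else "nao pertence a sequencia"

-- ===== PRECONDITION & SPEC =====
def Spec_calculaFibonacci (numberx : Int) (out : String) : Prop := out = calculaFibonacci_alt numberx
instance (numberx : Int) (out : String) : Decidable (Spec_calculaFibonacci numberx out) := by unfold Spec_calculaFibonacci; infer_instance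

-- ===== CLAIM (what is proved, stated in full; the proofs are below) =====
def Claim_equal_calculaFibonacci : Prop := ∀ (numberx : Int), Dom_calculaFibonacci numberx → Spec_calculaFibonacci numberx (calculaFibonacci numberx)

-- ===== LEMMAS AND PROOFS =====

lemma fib_cast_pos (k : ℕ) : (1 : ℤ) ≤ (Nat.fib (k + 1) : ℤ) := by
  exact_mod_cast Nat.fib_pos.mpr (Nat.succ_pos k)

-- Cassini-style identity in ℤ
lemma fib_cassini (k : ℕ) :
    ((Nat.fib (k+1) : ℤ))^2 - (Nat.fib (k+1) : ℤ) * (Nat.fib k : ℤ) - (Nat.fib k : ℤ)^2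
      = (-1)^k := by
  induction k with
  | zero => simp
  | succ k ih =>
    have h : (Nat.fib (k+2) : ℤ) = (Nat.fib k : ℤ) + (Nat.fib (k+1) : ℤ) := by
      exact_mod_cast congrArg (Nat.cast : ℕ → ℤ) (Nat.fib_add_two (n := k))
    rw [pow_succ]
    linear_combination h * ((Nat.fib (k+2) : ℤ) + (Nat.fib k : ℤ)) - ih

-- forward square identity: (2F_{k+1} - F_k)² = 5F_k² + 4(-1)^k
lemma fib_sq_identity (k : ℕ) :
    (2 * (Nat.fib (k+1) : ℤ) - (Nat.fib k : ℤ))^2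
      = 5 * (Nat.fib k : ℤ)^2 + 4 * (-1)^k := by
  linear_combination 4 * fib_cassini k

-- descent (Gessel's test, hard direction), strengthened with the Lucas companion
lemma gessel_back (N : ℕ) : ∀ n m : ℤ, n.toNat = N → 0 ≤ n → 0 ≤ m →
    (m^2 = 5*n^2 + 4 ∨ m^2 = 5*n^2 - 4) →
    ∃ k, (Nat.fib k : ℤ) = n ∧ 2 * (Nat.fib (k+1) : ℤ) - (Nat.fib k : ℤ) = m := by
  induction N using Nat.strong_induction_on with
  | _ N ih =>
    intro n m hN hn hm hsq
    by_cases h0 : n = 0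
    · subst h0
      rcases hsq with h | h
      · have hm2 : m = 2 := by
          have hz : (m - 2) * (m + 2) = 0 := by linear_combination h
          rcases mul_eq_zero.mp hz with h' | h' <;> omega
        exact ⟨0, by simp, by simp [hm2]⟩
      · exfalso; nlinarith [sq_nonneg m]
    by_cases h1 : n = 1
    · subst h1
      rcases hsq with h | h
      · have hm3 : m = 3 := by
          have hz : (m - 3) * (m + 3) = 0 := by linear_combination h
          rcases mul_eq_zero.mp hz with h' | h' <;> omega
        refine ⟨2, by simp, ?_⟩
        simp [hm3, Nat.fib_add_two]
      · have hm1 : m = 1 := by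
          have hz : (m - 1) * (m + 1) = 0 := by linear_combination h
          rcases mul_eq_zero.mp hz with h' | h' <;> omega
        exact ⟨1, by simp, by simp [hm1]⟩
    have hn2 : 2 ≤ n := by omega
    have hnn : 4 ≤ n * n := by nlinarith
    have hm2n : 2*n ≤ m := by
      by_contra hc
      have hc2 : m < 2*n := by omega
      have h4 : m * m < (2*n) * (2*n) := mul_self_lt_mul_self hm hc2
      rcases hsq with hs | hs <;> nlinarith
    have hm3n : m < 3*n := by
      by_contra hc
      have hc3 : 3*n ≤ m := by omega
      have h9 : (3*n) * (3*n) ≤ m * m := mul_self_le_mul_self (by omega) hc3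
      rcases hsq with hs | hs <;> nlinarith
    -- parity: m ≡ n (mod 2)
    have heven : Even (m - n) := by
      rcases Int.even_or_odd (m - n) with h | h
      · exact h
      · exfalso
        have hodd2 : Odd (m + n) := by
          have : m + n = (m - n) + 2*n := by ring
          rw [this]; exact h.add_even (even_two_mul n)
        have hodd : Odd ((m - n) * (m + n)) := h.mul hodd2
        have hev : Even ((m - n) * (m + n)) := by
          rcases hsq with hs | hs
          · exact ⟨2*(n*n) + 2, by linear_combination hs⟩
          · exact ⟨2*(n*n) - 2, by linear_combination hs⟩
        obtain ⟨c, hc⟩ := hodd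
        obtain ⟨e, he⟩ := hev
        omega
    obtain ⟨d, hd⟩ := heven   -- m - n = d + d
    have hm : m = n + 2*d := by omega
    have hd1 : 1 ≤ d := by omega
    have hdn : d < n := by omega
    subst hm
    have hsq' : (2*n - d)^2 = 5*d^2 + 4 ∨ (2*n - d)^2 = 5*d^2 - 4 := by
      rcases hsq with hs | hs
      · right; linear_combination -hs
      · left; linear_combination -hs
    have hlt : d.toNat < N := by omega
    obtain ⟨k, hk1, hk2⟩ := ih d.toNat hlt d (2*n - d) rfl (by omega) (by omega) hsq'
    have hfib1 : (Nat.fib (k+1) : ℤ) = n := by omega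
    have hfib2 : (Nat.fib (k+1+1) : ℤ) = (Nat.fib k : ℤ) + (Nat.fib (k+1) : ℤ) := by
      exact_mod_cast congrArg (Nat.cast : ℕ → ℤ) (Nat.fib_add_two (n := k))
    exact ⟨k+1, hfib1, by omega⟩

-- Gessel's test, both directions
lemma gessel (n : ℤ) (hn : 0 ≤ n) :
    (∃ k, (Nat.fib k : ℤ) = n) ↔
      ((∃ s : ℤ, s * s = 5*n*n + 4) ∨ (∃ s : ℤ, s * s = 5*n*n - 4)) := by
  constructor
  · rintro ⟨k, rfl⟩
    have h := fib_sq_identity k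
    rcases Nat.even_or_odd k with hk | hk
    · left
      exact ⟨2 * (Nat.fib (k+1) : ℤ) - (Nat.fib k : ℤ), by
        rw [hk.neg_one_pow] at h; nlinarith⟩
    · right
      exact ⟨2 * (Nat.fib (k+1) : ℤ) - (Nat.fib k : ℤ), by
        rw [hk.neg_one_pow] at h; nlinarith⟩
  · intro h
    have hsq : ∃ m : ℤ, 0 ≤ m ∧ (m^2 = 5*n^2 + 4 ∨ m^2 = 5*n^2 - 4) := by
      rcases h with ⟨s, hs⟩ | ⟨s, hs⟩
      · exact ⟨|s|, abs_nonneg s, Or.inl (by rw [sq_abs]; nlinarith)⟩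
      · exact ⟨|s|, abs_nonneg s, Or.inr (by rw [sq_abs]; nlinarith)⟩
    obtain ⟨m, hm, hsq⟩ := hsq
    obtain ⟨k, hk, -⟩ := gessel_back n.toNat n m rfl hn hm hsq
    exact ⟨k, hk⟩

-- proof-irrelevance congruence for A's loop
lemma fibLoopA_congr (n y z z' : ℤ) (h : z = z') (hy : 0 ≤ y) (hz : 1 ≤ z) (hz' : 1 ≤ z') :
    fibLoopA n y z hy hz = fibLoopA n y z' hy hz' := by subst h; rfl

-- characterisation of A's loop along Fibonacci pairs
lemma loopA_char (M : ℕ) : ∀ (n : ℤ) (k : ℕ),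
    ((n + 1 - (Nat.fib k : ℤ)).toNat + (n + 1 - (Nat.fib (k+1) : ℤ)).toNat) ≤ M →
    (fibLoopA n (Nat.fib k) (Nat.fib (k+1)) (Int.natCast_nonneg _) (fib_cast_pos k)
        = "pertence a sequencia"
      ↔ ∃ j, k ≤ j ∧ (Nat.fib j : ℤ) = n) := by
  induction M with
  | zero =>
    intro n k hM
    rw [fibLoopA]
    have h1 := fib_cast_pos k
    split_ifs with hle heq
    · simp only [true_iff]
      exact ⟨k, le_refl k, heq⟩
    · exfalso; omega
    · simp only [String.reduceEq, false_iff, not_exists]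
      rintro j ⟨hj, hfib⟩
      have : (Nat.fib k : ℤ) ≤ (Nat.fib j : ℤ) := by exact_mod_cast Nat.fib_mono hj
      omega
  | succ M ihM =>
    intro n k hM
    rw [fibLoopA]
    have h1 := fib_cast_pos k
    split_ifs with hle heq
    · simp only [true_iff]
      exact ⟨k, le_refl k, heq⟩
    · -- recursive step: (y, z) ↦ (F_{k+1}, F_{k+1} + F_k) = (F_{k+1}, F_{k+2})
      have hfib2 : (Nat.fib (k+1) : ℤ) + (Nat.fib k : ℤ) = (Nat.fib (k+1+1) : ℤ) := by
        have hf : Nat.fib (k+1+1) = Nat.fib k + Nat.fib (k+1) := Nat.fib_add_two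
        have h2 : (Nat.fib (k+1+1) : ℤ) = (Nat.fib k : ℤ) + (Nat.fib (k+1) : ℤ) := by
          exact_mod_cast congrArg (Nat.cast : ℕ → ℤ) hf
        omega
      rw [fibLoopA_congr n (Nat.fib (k+1)) _ _ hfib2 (Int.natCast_nonneg _) (by omega)
            (fib_cast_pos (k+1))]
      rw [ihM n (k+1) (by
        have h2 := fib_cast_pos (k+1)
        omega)]
      constructor
      · rintro ⟨j, hj, hfib⟩; exact ⟨j, by omega, hfib⟩
      · rintro ⟨j, hj, hfib⟩
        refine ⟨j, ?_, hfib⟩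
        rcases Nat.eq_or_lt_of_le hj with rfl | h
        · exact absurd hfib heq
        · omega
    · simp only [String.reduceEq, false_iff, not_exists]
      rintro j ⟨hj, hfib⟩
      have : (Nat.fib k : ℤ) ≤ (Nat.fib j : ℤ) := by exact_mod_cast Nat.fib_mono hj
      omega

-- A's loop only ever produces one of the two strings
lemma loopA_cases (M : ℕ) : ∀ (n y z : ℤ) (hy : 0 ≤ y) (hz : 1 ≤ z),
    ((n + 1 - y).toNat + (n + 1 - z).toNat) ≤ M →
    (fibLoopA n y z hy hz = "pertence a sequencia" ∨
     fibLoopA n y z hy hz = "nao pertence a sequencia") := by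
  induction M with
  | zero =>
    intro n y z hy hz hM
    rw [fibLoopA]
    split_ifs with hle heq
    · exact Or.inl rfl
    · exfalso; omega
    · exact Or.inr rfl
  | succ M ihM =>
    intro n y z hy hz hM
    rw [fibLoopA]
    split_ifs with hle heq
    · exact Or.inl rfl
    · exact ihM n z (z + y) (by omega) (by omega) (by omega)
    · exact Or.inr rfl

lemma A_char (n : ℤ) :
    (calculaFibonacci n = "pertence a sequencia" ↔ ∃ k, (Nat.fib k : ℤ) = n) := by
  unfold calculaFibonacci
  have h0 : fibLoopA n 0 1 (by omega) (by omega)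
      = fibLoopA n (Nat.fib 0) (Nat.fib 1) (Int.natCast_nonneg _) (fib_cast_pos 0) := by
    simp [Nat.fib_zero, Nat.fib_one]
  rw [h0, loopA_char ((n + 1 - (Nat.fib 0 : ℤ)).toNat + (n + 1 - (Nat.fib 1 : ℤ)).toNat) n 0
        (le_refl _)]
  constructor
  · rintro ⟨j, -, hfib⟩; exact ⟨j, hfib⟩
  · rintro ⟨j, hfib⟩; exact ⟨j, Nat.zero_le j, hfib⟩

lemma A_cases (n : ℤ) :
    calculaFibonacci n = "pertence a sequencia" ∨
    calculaFibonacci n = "nao pertence a sequencia" := by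
  unfold calculaFibonacci
  exact loopA_cases _ n 0 1 (by omega) (by omega) (le_refl _)

-- binary-search isqrt correctness
lemma isqrtLoop_step (v lo hi : ℤ) (h : hi - lo > 1) :
    isqrtLoop v lo hi =
      if PySem.Int.floordiv (lo + hi) 2 * PySem.Int.floordiv (lo + hi) 2 ≤ v then
        isqrtLoop v (PySem.Int.floordiv (lo + hi) 2) hi
      else isqrtLoop v lo (PySem.Int.floordiv (lo + hi) 2) := by
  rw [isqrtLoop, dif_pos h]

lemma isqrtLoop_base (v lo hi : ℤ) (h : ¬ hi - lo > 1) : isqrtLoop v lo hi = lo := by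
  rw [isqrtLoop, dif_neg h]

lemma isqrtLoop_spec (M : ℕ) : ∀ (v lo hi : ℤ), (hi - lo).toNat ≤ M →
    1 ≤ lo → lo < hi → lo * lo ≤ v → v < hi * hi →
    (1 ≤ isqrtLoop v lo hi ∧ isqrtLoop v lo hi * isqrtLoop v lo hi ≤ v ∧
      v < (isqrtLoop v lo hi + 1) * (isqrtLoop v lo hi + 1)) := by
  induction M with
  | zero => intro v lo hi hM hlo hlh hlv hvh; omega
  | succ M ihM =>
    intro v lo hi hM hlo hlh hlv hvh
    by_cases hgap : hi - lo > 1
    · have hmid : lo < PySem.Int.floordiv (lo + hi) 2 ∧ PySem.Int.floordiv (lo + hi) 2 < hi := by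
        rw [PySem.Int.floordiv_eq_ediv_of_pos (by omega)]
        omega
      rw [isqrtLoop_step v lo hi hgap]
      by_cases hle : PySem.Int.floordiv (lo + hi) 2 * PySem.Int.floordiv (lo + hi) 2 ≤ v
      · rw [if_pos hle]
        exact ihM v _ hi (by omega) (by omega) (by omega) hle hvh
      · rw [if_neg hle]
        exact ihM v lo _ (by omega) hlo (by omega) hlv (by omega)
    · rw [isqrtLoop_base v lo hi hgap]
      have hhi : hi = lo + 1 := by omega
      subst hhi
      exact ⟨hlo, hlv, hvh⟩

lemma isSquare_spec (v : ℤ) : (pyIsSquare v = true) ↔ ∃ s : ℤ, s * s = v := by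
  simp only [pyIsSquare, pyIsqrt]
  split_ifs with hneg hsmall
  · simp only [false_iff, not_exists]
    intro s hs
    nlinarith [mul_self_nonneg s]
  · -- 0 ≤ v < 2, isqrt v = v
    simp only [beq_iff_eq]
    constructor
    · intro h; exact ⟨v, h⟩
    · rintro ⟨s, hs⟩
      interval_cases v <;> norm_num
  · -- v ≥ 2
    have hv2 : 2 ≤ v := by omega
    obtain ⟨hr1, hr2, hr3⟩ := isqrtLoop_spec (v - 1).toNat v 1 v (by omega) (by omega)
      (by omega) (by omega) (by nlinarith)
    simp only [beq_iff_eq]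
    constructor
    · intro h; exact ⟨isqrtLoop v 1 v, h⟩
    · rintro ⟨s, hs⟩
      have habs : |s| * |s| = v := by rw [← abs_mul, hs]; exact abs_of_nonneg (by omega)
      have h0 : 0 ≤ |s| := abs_nonneg s
      have hle : isqrtLoop v 1 v ≤ |s| := by nlinarith
      have hlt : |s| < isqrtLoop v 1 v + 1 := by nlinarith
      have heq : |s| = isqrtLoop v 1 v := by omega
      rw [← heq]; exact habs

lemma B_char (n : ℤ) (hn : 0 ≤ n) :
    (calculaFibonacci_alt n = "pertence a sequencia" ↔
      ((∃ s : ℤ, s * s = 5*n*n + 4) ∨ (∃ s : ℤ, s * s = 5*n*n - 4))) := by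
  unfold calculaFibonacci_alt
  rw [if_neg (by omega)]
  have hiff : (pyIsSquare (5*n*n + 4) || pyIsSquare (5*n*n - 4)) = true ↔
      ((∃ s : ℤ, s * s = 5*n*n + 4) ∨ (∃ s : ℤ, s * s = 5*n*n - 4)) := by
    rw [Bool.or_eq_true, isSquare_spec, isSquare_spec]
  by_cases h : (pyIsSquare (5*n*n + 4) || pyIsSquare (5*n*n - 4)) = true
  · rw [h]
    exact iff_of_true (by simp) (hiff.mp h)
  · rw [Bool.not_eq_true] at h
    rw [h]
    refine iff_of_false (by simp) ?_
    intro hd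
    have h2 := hiff.mpr hd
    rw [h] at h2
    exact absurd h2 (by simp)

lemma B_cases (n : ℤ) :
    calculaFibonacci_alt n = "pertence a sequencia" ∨
    calculaFibonacci_alt n = "nao pertence a sequencia" := by
  unfold calculaFibonacci_alt
  split_ifs <;> simp

-- ===== VERDICT (by name: the statement is the Claim_ definition above) =====
theorem calculaFibonacci_spec : Claim_equal_calculaFibonacci := by
  intro n _
  unfold Spec_calculaFibonacci
  by_cases hn : n < 0
  · have hA : calculaFibonacci n = "nao pertence a sequencia" := by
      unfold calculaFibonacci
      rw [fibLoopA]
      rw [dif_neg (by omega)]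
    have hB : calculaFibonacci_alt n = "nao pertence a sequencia" := by
      unfold calculaFibonacci_alt
      rw [if_pos hn]
    rw [hA, hB]
  · have hn0 : 0 ≤ n := by omega
    have hiff : (calculaFibonacci n = "pertence a sequencia" ↔
        calculaFibonacci_alt n = "pertence a sequencia") := by
      rw [A_char, B_char n hn0, gessel n hn0]
    rcases A_cases n with hA | hA <;> rcases B_cases n with hB | hB
    · rw [hA, hB]
    · exact absurd (hiff.mp hA) (by rw [hB]; simp)
    · exact absurd (hiff.mpr hB) (by rw [hA]; simp)
    · rw [hA, hB]
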